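-- pv_equiv track=rewrite | github.com/lacey1998/companion_bot | evaluate_model.py | parse_training_format
-- ===== SOURCE A (Python) =====
-- from typing import List, Dict, Tuple
--
-- def parse_training_format(text: str) -> Dict[str, str]:
--     """
--     Parse training data format: "[emotion]\nContext:...\nUser:...\nChatbot:..."
--
--     Returns:
--         dict with keys: emotion, context, user_input, target_response
--     """
--     lines = text.strip().split('\n')
--
--     # Extract emotion (first line, in brackets)
--     emotion = "neutral"
--     if lines and lines[0].startswith('[') and lines[0].endswith(']'):
--         emotion = lines[0][1:-1].strip()
--         lines = lines[1:]
--
--     # Find Context, User, and Chatbot lines.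
--     # We specifically want the *last* chatbot turn as the target,
--     # and the last user turn before that as the user_input.
--     context = ""
--     user_input = ""
--     target_response = ""
--
--     user_indices = []
--     chatbot_indices = []
--
--     for i, line in enumerate(lines):
--         if line.startswith("Context:") and not context:
--             context = line.replace("Context:", "").strip()
--         elif line.startswith("User:"):
--             user_indices.append(i)
--         elif line.startswith("Chatbot:"):
--             chatbot_indices.append(i)
--
--     # Determine last chatbot segment (if any)
--     if chatbot_indices:
--         last_chatbot_idx = chatbot_indices[-1]
--         # Target response is everything from the last "Chatbot:" onward
--         first_line = lines[last_chatbot_idx].replace("Chatbot:", "").strip()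
--         if last_chatbot_idx + 1 < len(lines):
--             target_response = "\n".join([first_line] + lines[last_chatbot_idx + 1 :]).strip()
--         else:
--             target_response = first_line
--
--         # User input: last "User:" line that appears before this chatbot line
--         prior_users = [idx for idx in user_indices if idx < last_chatbot_idx]
--         if prior_users:
--             last_user_idx = prior_users[-1]
--             user_input = lines[last_user_idx].replace("User:", "").strip()
--     else:
--         # Fallback: no Chatbot line; use last User as input if present
--         if user_indices:
--             last_user_idx = user_indices[-1]
--             user_input = lines[last_user_idx].replace("User:", "").strip()
--
--     return {
--         "emotion": emotion,
--         "context": context,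
--         "user_input": user_input,
--         "target_response": target_response
--     }
-- ===== SOURCE B (Python) =====
-- def parse_training_format(text: str):
--     """Parse "[emotion]\\nContext:...\\nUser:...\\nChatbot:..." by reverse scanning
--     for the last Chatbot turn instead of collecting index lists."""
--     lines = text.strip().split('\n')
--
--     emotion = "neutral"
--     if lines and lines[0].startswith('[') and lines[0].endswith(']'):
--         emotion = lines[0][1:-1].strip()
--         lines = lines[1:]
--
--     # First Context line whose payload is non-empty (stop as soon as one is found).
--     context = ""
--     for line in lines:
--         if line.startswith("Context:"):
--             context = line.replace("Context:", "").strip()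
--             if context:
--                 break
--
--     user_input = ""
--     target_response = ""
--
--     # Walk the lines backwards; collect the tail until the last "Chatbot:" line.
--     it = iter(reversed(lines))
--     found = None
--     tail_rev = []
--     for line in it:
--         if line.startswith("Chatbot:"):
--             found = line
--             break
--         tail_rev.append(line)
--
--     if found is not None:
--         first_line = found.replace("Chatbot:", "").strip()
--         if tail_rev:
--             target_response = "\n".join([first_line] + tail_rev[::-1]).strip()
--         else:
--             target_response = first_line
--         # 'it' now yields exactly the lines before the last Chatbot, latest first.
--         for line in it:
--             if line.startswith("User:"):
--                 user_input = line.replace("User:", "").strip()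
--                 break
--     else:
--         for line in reversed(lines):
--             if line.startswith("User:"):
--                 user_input = line.replace("User:", "").strip()
--                 break
--
--     return {
--         "emotion": emotion,
--         "context": context,
--         "user_input": user_input,
--         "target_response": target_response
--     }
-- ===== Notes on version B (the rewrite author's own statement) =====
-- stated objective: alternative
-- what changed: Instead of one forward pass collecting full lists of User/Chatbot indices and then filtering/indexing them, B scans the lines in reverse, stopping at the first (i.e. last) 'Chatbot:' line while collecting the tail, then continues the same backward walk to the nearest preceding 'User:' line; context is found by a forward scan that stops at the first non-empty Context payload.
import Mathlib
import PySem

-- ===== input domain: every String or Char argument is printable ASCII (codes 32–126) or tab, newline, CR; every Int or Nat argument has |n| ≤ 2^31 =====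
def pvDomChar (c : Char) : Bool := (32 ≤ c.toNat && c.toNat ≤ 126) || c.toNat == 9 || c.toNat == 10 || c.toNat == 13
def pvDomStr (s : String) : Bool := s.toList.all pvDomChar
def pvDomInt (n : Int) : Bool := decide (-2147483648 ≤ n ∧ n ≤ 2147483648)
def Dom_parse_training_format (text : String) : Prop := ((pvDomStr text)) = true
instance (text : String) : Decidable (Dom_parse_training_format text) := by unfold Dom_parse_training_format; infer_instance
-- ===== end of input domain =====

-- B replaces A's index-list bookkeeping by an early-stopping reverse scan; alternative decomposition, same cost.

-- ===== PORT A =====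
-- literal transliteration of A: one forward enumerate-loop collecting context and the
-- full lists of User:/Chatbot: indices, then indexing/filtering those lists.
def parse_training_format (text : String) : List (String × String) :=
  let lines0 := (PySem.Str.split? (PySem.Str.strip text) "\n").getD []
  let (emotion, lines) :=
    match lines0 with
    | [] => ("neutral", lines0)
    | l0 :: rest =>
      if PySem.Str.startswith l0 "[" && PySem.Str.endswith l0 "]" then
        (PySem.Str.strip (PySem.Str.slice l0 (some 1) (some (-1))), rest)
      else ("neutral", l0 :: rest)
  let st :=
    (PySem.List.enumerate lines 0).foldl
      (fun (st : String × List Int × List Int) il =>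
        let ctx := st.1; let us := st.2.1; let cs := st.2.2
        let i := il.1; let line := il.2
        if PySem.Str.startswith line "Context:" && (ctx == "") then
          (PySem.Str.strip (PySem.Str.replace line "Context:" ""), us, cs)
        else if PySem.Str.startswith line "User:" then (ctx, us ++ [i], cs)
        else if PySem.Str.startswith line "Chatbot:" then (ctx, us, cs ++ [i])
        else (ctx, us, cs))
      ("", ([] : List Int), ([] : List Int))
  let context := st.1; let user_indices := st.2.1; let chatbot_indices := st.2.2
  match PySem.List.pyGet? chatbot_indices (-1) with
  | some last_chatbot_idx =>
    let first_line := PySem.Str.strip (PySem.Str.replace (PySem.List.pyGetD lines last_chatbot_idx "") "Chatbot:" "")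
    let target_response :=
      if last_chatbot_idx + 1 < (lines.length : Int) then
        PySem.Str.strip (PySem.Str.join "\n" ([first_line] ++ PySem.List.slice lines (some (last_chatbot_idx + 1)) none))
      else first_line
    let prior_users := user_indices.filter (fun idx => decide (idx < last_chatbot_idx))
    let user_input :=
      match PySem.List.pyGet? prior_users (-1) with
      | some last_user_idx => PySem.Str.strip (PySem.Str.replace (PySem.List.pyGetD lines last_user_idx "") "User:" "")
      | none => ""
    [("emotion", emotion), ("context", context), ("user_input", user_input), ("target_response", target_response)]
  | none =>
    let user_input :=
      match PySem.List.pyGet? user_indices (-1) with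
      | some last_user_idx => PySem.Str.strip (PySem.Str.replace (PySem.List.pyGetD lines last_user_idx "") "User:" "")
      | none => ""
    [("emotion", emotion), ("context", context), ("user_input", user_input), ("target_response", "")]

-- ===== PORT B =====
-- B-side helpers (each one is a for-loop-with-break of Source B)
-- first Context: line, stopping as soon as its payload is non-empty
def pvFirstContext : List String → String
  | [] => ""
  | l :: rest =>
    if PySem.Str.startswith l "Context:" then
      let v := PySem.Str.strip (PySem.Str.replace l "Context:" "")
      if v ≠ "" then v else pvFirstContext rest
    else pvFirstContext rest

-- reverse walk: (found Chatbot line, lines collected after it (reversed), remaining lines before it)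
def pvSplitCb : List String → List String → Option String × List String × List String
  | [], tail_rev => (none, tail_rev, [])
  | l :: rest, tail_rev =>
    if PySem.Str.startswith l "Chatbot:" then (some l, tail_rev, rest)
    else pvSplitCb rest (tail_rev ++ [l])

-- backward walk for the nearest User: line
def pvLastUser (rev : List String) : String :=
  match rev.find? (fun l => PySem.Str.startswith l "User:") with
  | some l => PySem.Str.strip (PySem.Str.replace l "User:" "")
  | none => ""

def parse_training_format_alt (text : String) : List (String × String) :=
  let lines0 := (PySem.Str.split? (PySem.Str.strip text) "\n").getD []
  let (emotion, lines) :=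
    match lines0 with
    | [] => ("neutral", lines0)
    | l0 :: rest =>
      if PySem.Str.startswith l0 "[" && PySem.Str.endswith l0 "]" then
        (PySem.Str.strip (PySem.Str.slice l0 (some 1) (some (-1))), rest)
      else ("neutral", l0 :: rest)
  let context := pvFirstContext lines
  match pvSplitCb lines.reverse [] with
  | (some found, tail_rev, before) =>
    let first_line := PySem.Str.strip (PySem.Str.replace found "Chatbot:" "")
    let target_response :=
      if tail_rev = [] then first_line
      else PySem.Str.strip (PySem.Str.join "\n" (first_line :: tail_rev.reverse))
    [("emotion", emotion), ("context", context), ("user_input", pvLastUser before), ("target_response", target_response)]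
  | (none, _, _) =>
    [("emotion", emotion), ("context", context), ("user_input", pvLastUser lines.reverse), ("target_response", "")]

-- ===== PRECONDITION & SPEC =====
def Spec_parse_training_format (text : String) (out : List (String × String)) : Prop := out = parse_training_format_alt text
instance (text : String) (out : List (String × String)) : Decidable (Spec_parse_training_format text out) := by unfold Spec_parse_training_format; infer_instance

-- ===== CLAIM (what is proved, stated in full; the proofs are below) =====
def Claim_equal_parse_training_format : Prop := ∀ (text : String), Dom_parse_training_format text → Spec_parse_training_format text (parse_training_format text)

-- ===== LEMMAS AND PROOFS =====

-- proof-side helpers: a characterisation of A's single fold as three independent scans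
def pvPu : String → Bool := fun l => PySem.Str.startswith l "User:"
def pvPcb : String → Bool := fun l => PySem.Str.startswith l "Chatbot:"

def pvIdx (p : String → Bool) (lines : List String) (s : Int) : List Int :=
  (PySem.List.enumerate lines s).filterMap (fun il => if p il.2 then some il.1 else none)

def pvCtxF (ctx : String) (ls : List String) : String :=
  ls.foldl (fun c l =>
    if PySem.Str.startswith l "Context:" && (c == "") then
      PySem.Str.strip (PySem.Str.replace l "Context:" "") else c) ctx

-- the three recognised prefixes are pairwise exclusive
lemma pv_disj_uc (l : String) (h1 : PySem.Str.startswith l "User:" = true)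
    (h2 : PySem.Str.startswith l "Context:" = true) : False := by
  rw [PySem.Str.startswith_eq, PySem.Chars.startswith_iff] at h1 h2
  have := List.prefix_of_prefix_length_le h1 h2 (by decide)
  revert this; decide

lemma pv_disj_ucb (l : String) (h1 : PySem.Str.startswith l "User:" = true)
    (h2 : PySem.Str.startswith l "Chatbot:" = true) : False := by
  rw [PySem.Str.startswith_eq, PySem.Chars.startswith_iff] at h1 h2
  have := List.prefix_of_prefix_length_le h1 h2 (by decide)
  revert this; decide

lemma pv_disj_ccb (l : String) (h1 : PySem.Str.startswith l "Context:" = true)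
    (h2 : PySem.Str.startswith l "Chatbot:" = true) : False := by
  rw [PySem.Str.startswith_eq, PySem.Chars.startswith_iff] at h1 h2
  have := List.prefix_of_prefix_length_le h1 h2 (by decide)
  revert this; decide

lemma pvIdx_nil (p : String → Bool) (s : Int) : pvIdx p [] s = [] := rfl

lemma pvIdx_cons_true (p : String → Bool) (l : String) (rest : List String) (s : Int)
    (h : p l = true) : pvIdx p (l :: rest) s = s :: pvIdx p rest (s + 1) := by
  simp [pvIdx, PySem.List.enumerate_cons, h]

lemma pvIdx_cons_false (p : String → Bool) (l : String) (rest : List String) (s : Int)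
    (h : p l = false) : pvIdx p (l :: rest) s = pvIdx p rest (s + 1) := by
  simp [pvIdx, PySem.List.enumerate_cons, h]

lemma pvIdx_cons (p : String → Bool) (l : String) (rest : List String) (s : Int) :
    pvIdx p (l :: rest) s = (if p l then [s] else []) ++ pvIdx p rest (s + 1) := by
  cases h : p l <;> simp [pvIdx_cons_true, pvIdx_cons_false, h]

lemma pvCtxF_cons (ctx l : String) (ls : List String) :
    pvCtxF ctx (l :: ls)
      = pvCtxF (if (PySem.Str.startswith l "Context:" && (ctx == "")) = true then
          PySem.Str.strip (PySem.Str.replace l "Context:" "") else ctx) ls := by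
  simp only [pvCtxF, List.foldl_cons]

lemma pvIdx_append (p : String → Bool) (xs ys : List String) (s : Int) :
    pvIdx p (xs ++ ys) s = pvIdx p xs s ++ pvIdx p ys (s + xs.length) := by
  induction xs generalizing s with
  | nil => simp [pvIdx_nil]
  | cons x xs ih =>
    simp only [List.cons_append, pvIdx_cons, ih (s + 1), List.length_cons, List.append_assoc]
    congr 2
    push_cast
    ring_nf

lemma pvIdx_bounds (p : String → Bool) (xs : List String) (s : Int) :
    ∀ i ∈ pvIdx p xs s, s ≤ i ∧ i < s + xs.length := by
  induction xs generalizing s with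
  | nil => simp [pvIdx_nil]
  | cons x xs ih =>
    intro i hi
    rw [pvIdx_cons] at hi
    rcases List.mem_append.mp hi with h | h
    · have : i = s := by revert h; split <;> simp_all
      simp [this]
    · have := ih (s + 1) i h
      simp only [List.length_cons]
      push_cast
      omega

lemma pvIdx_eq_nil (p : String → Bool) (xs : List String) (s : Int)
    (h : ∀ l ∈ xs, p l = false) : pvIdx p xs s = [] := by
  induction xs generalizing s with
  | nil => rfl
  | cons x xs ih =>
    rw [pvIdx_cons, h x (by simp), ih (s + 1) (fun l hl => h l (by simp [hl]))]
    simp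

-- A's combined fold splits into the context fold and the two index scans
lemma pv_foldA (lines : List String) : ∀ (s : Int) (ctx : String) (us cs : List Int),
    (PySem.List.enumerate lines s).foldl
      (fun (st : String × List Int × List Int) il =>
        let ctx := st.1; let us := st.2.1; let cs := st.2.2
        let i := il.1; let line := il.2
        if PySem.Str.startswith line "Context:" && (ctx == "") then
          (PySem.Str.strip (PySem.Str.replace line "Context:" ""), us, cs)
        else if PySem.Str.startswith line "User:" then (ctx, us ++ [i], cs)
        else if PySem.Str.startswith line "Chatbot:" then (ctx, us, cs ++ [i])
        else (ctx, us, cs))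
      (ctx, us, cs)
    = (pvCtxF ctx lines, us ++ pvIdx pvPu lines s, cs ++ pvIdx pvPcb lines s) := by
  induction lines with
  | nil => intro s ctx us cs; simp [pvCtxF, pvIdx_nil]
  | cons l rest ih =>
    intro s ctx us cs
    rw [PySem.List.enumerate_cons, List.foldl_cons]
    simp only []
    by_cases hc : (PySem.Str.startswith l "Context:" && (ctx == "")) = true
    · have hcs : PySem.Str.startswith l "Context:" = true := by
        rcases Bool.and_eq_true_iff.mp hc with ⟨h1, _⟩; exact h1
      have he : ctx = "" := by
        rcases Bool.and_eq_true_iff.mp hc with ⟨_, h2⟩; simpa using h2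
      have hu : pvPu l = false := by
        by_contra h; exact pv_disj_uc l (by simpa [pvPu] using h) hcs
      have hcb : pvPcb l = false := by
        by_contra h; exact pv_disj_ccb l hcs (by simpa [pvPcb] using h)
      rw [if_pos hc, ih, pvCtxF_cons, if_pos hc,
        pvIdx_cons_false pvPu l rest s hu, pvIdx_cons_false pvPcb l rest s hcb]
    · rw [if_neg hc]
      by_cases hu : PySem.Str.startswith l "User:" = true
      · have hcb : pvPcb l = false := by
          by_contra h; exact pv_disj_ucb l hu (by simpa [pvPcb] using h)
        rw [if_pos hu, ih, pvCtxF_cons, if_neg hc,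
          pvIdx_cons_true pvPu l rest s (by simpa [pvPu] using hu),
          pvIdx_cons_false pvPcb l rest s hcb]
        simp
      · rw [if_neg hu]
        by_cases hb : PySem.Str.startswith l "Chatbot:" = true
        · rw [if_pos hb, ih, pvCtxF_cons, if_neg hc,
            pvIdx_cons_false pvPu l rest s (by simpa [pvPu] using hu),
            pvIdx_cons_true pvPcb l rest s (by simpa [pvPcb] using hb)]
          simp
        · rw [if_neg hb, ih, pvCtxF_cons, if_neg hc,
            pvIdx_cons_false pvPu l rest s (by simpa [pvPu] using hu),
            pvIdx_cons_false pvPcb l rest s (by simpa [pvPcb] using hb)]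

lemma pvCtxF_of_ne (ls : List String) : ∀ ctx : String, ctx ≠ "" → pvCtxF ctx ls = ctx := by
  induction ls with
  | nil => intro ctx _; rfl
  | cons l rest ih =>
    intro ctx h
    have : (ctx == "") = false := by simpa using h
    simp only [pvCtxF, List.foldl_cons, this, Bool.and_false, Bool.false_eq_true, if_false]
    exact ih ctx h

lemma pvCtxF_eq_first (ls : List String) : pvCtxF "" ls = pvFirstContext ls := by
  induction ls with
  | nil => rfl
  | cons l rest ih =>
    rw [pvCtxF_cons]
    by_cases hc : PySem.Str.startswith l "Context:" = true
    · rw [if_pos (by rw [hc]; rfl)]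
      simp only [pvFirstContext]
      rw [if_pos hc]
      by_cases hv : PySem.Str.strip (PySem.Str.replace l "Context:" "") = ""
      · rw [if_neg (by simpa using hv), hv]
        exact ih
      · rw [if_pos hv]
        exact pvCtxF_of_ne rest _ hv
    · rw [if_neg (fun hcon => hc (Bool.and_eq_true_iff.mp hcon).1)]
      simp only [pvFirstContext]
      rw [if_neg hc]
      exact ih

lemma pvSplitCb_none (rl : List String) : ∀ (suf : List String),
    (∀ l ∈ rl, pvPcb l = false) → pvSplitCb rl suf = (none, suf ++ rl, []) := by
  induction rl with
  | nil => intro suf _; simp [pvSplitCb]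
  | cons l rest ih =>
    intro suf h
    have hl : PySem.Str.startswith l "Chatbot:" = false := h l (by simp)
    rw [pvSplitCb, if_neg (by rw [hl]; simp), ih (suf ++ [l]) (fun x hx => h x (by simp [hx]))]
    simp

lemma pvSplitCb_found (rl1 : List String) (c : String) (rl2 : List String) :
    ∀ (suf : List String), (∀ l ∈ rl1, pvPcb l = false) → pvPcb c = true →
    pvSplitCb (rl1 ++ c :: rl2) suf = (some c, suf ++ rl1, rl2) := by
  induction rl1 with
  | nil => intro suf _ hc; simp only [List.nil_append, pvSplitCb]
           rw [if_pos (show PySem.Str.startswith c "Chatbot:" = true from hc)]; simp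
  | cons l rest ih =>
    intro suf h hc
    have hl : PySem.Str.startswith l "Chatbot:" = false := h l (by simp)
    rw [List.cons_append, pvSplitCb, if_neg (by rw [hl]; simp),
      ih (suf ++ [l]) (fun x hx => h x (by simp [hx])) hc]
    simp

lemma pv_getD_append (xs ys : List String) (j : Int) (h0 : 0 ≤ j)
    (h : j < (xs.length : Int)) (d : String) :
    PySem.List.pyGetD (xs ++ ys) j d = PySem.List.pyGetD xs j d := by
  rw [PySem.List.pyGetD_eq_getElem _ d h0 (by simp; omega),
    PySem.List.pyGetD_eq_getElem _ d h0 h,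
    List.getElem_append_left]

-- A's "last User index, then look it up" equals B's backward find?
lemma pv_lastUser (xs : List String) :
    (match (pvIdx pvPu xs 0).getLast? with
     | some j => PySem.Str.strip (PySem.Str.replace (PySem.List.pyGetD xs j "") "User:" "")
     | none => "") = pvLastUser xs.reverse := by
  induction xs using List.reverseRecOn with
  | nil => rfl
  | append_singleton xs x ih =>
    have hrev : (xs ++ [x]).reverse = x :: xs.reverse := by simp
    rw [pvIdx_append]
    by_cases hx : pvPu x = true
    · rw [show pvIdx pvPu [x] (0 + (xs.length : Int)) = [0 + (xs.length : Int)] by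
        simp [pvIdx_cons_true pvPu x [] _ hx, pvIdx_nil]]
      rw [List.getLast?_concat]
      have hlen : PySem.List.pyGetD (xs ++ [x]) (0 + (xs.length : Int)) "" = x := by
        rw [PySem.List.pyGetD_eq_getElem _ _ (by positivity) (by simp)]
        simp
      show PySem.Str.strip (PySem.Str.replace
          (PySem.List.pyGetD (xs ++ [x]) (0 + (xs.length : Int)) "") "User:" "") = _
      rw [hlen, hrev]
      unfold pvLastUser
      rw [List.find?_cons, show PySem.Str.startswith x "User:" = true from hx]
    · rw [show pvIdx pvPu [x] (0 + (xs.length : Int)) = [] by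
        simp [pvIdx_cons_false pvPu x [] _ (by simpa [pvPu] using hx), pvIdx_nil]]
      rw [List.append_nil]
      have hpv : pvLastUser (x :: xs.reverse) = pvLastUser xs.reverse := by
        unfold pvLastUser
        rw [List.find?_cons, show PySem.Str.startswith x "User:" = false by simpa [pvPu] using hx]
      rcases hlast : (pvIdx pvPu xs 0).getLast? with _ | j
      · rw [hlast] at ih
        show ("" : String) = _
        rw [hrev, hpv]
        exact ih
      · rw [hlast] at ih
        have hj := pvIdx_bounds pvPu xs 0 j (List.mem_of_getLast? hlast)
        show PySem.Str.strip (PySem.Str.replace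
            (PySem.List.pyGetD (xs ++ [x]) j "") "User:" "") = _
        rw [pv_getD_append xs [x] j (by omega) (by omega), hrev, hpv]
        exact ih

-- every line list either has no Chatbot line or decomposes at its last one
lemma pv_split (lines : List String) :
    (∀ l ∈ lines, pvPcb l = false) ∨
    ∃ pre c post, lines = pre ++ c :: post ∧ pvPcb c = true ∧ (∀ l ∈ post, pvPcb l = false) := by
  induction lines with
  | nil => left; simp
  | cons l rest ih =>
    rcases ih with hclean | ⟨pre, c, post, heq, hc, hpost⟩
    · by_cases hl : pvPcb l = true
      · right; exact ⟨[], l, rest, by simp, hl, hclean⟩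
      · left; intro x hx
        rcases List.mem_cons.mp hx with rfl | hx
        · simpa using hl
        · exact hclean x hx
    · right; exact ⟨l :: pre, c, post, by simp [heq], hc, hpost⟩


-- the two bodies agree for any emotion and remaining line list
lemma pv_main (emotion : String) (lines : List String) :
    (match PySem.List.pyGet?
        ((PySem.List.enumerate lines 0).foldl
          (fun (st : String × List Int × List Int) il =>
            let ctx := st.1; let us := st.2.1; let cs := st.2.2
            let i := il.1; let line := il.2
            if PySem.Str.startswith line "Context:" && (ctx == "") then
              (PySem.Str.strip (PySem.Str.replace line "Context:" ""), us, cs)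
            else if PySem.Str.startswith line "User:" then (ctx, us ++ [i], cs)
            else if PySem.Str.startswith line "Chatbot:" then (ctx, us, cs ++ [i])
            else (ctx, us, cs))
          ("", ([] : List Int), ([] : List Int))).2.2 (-1) with
     | some last_chatbot_idx =>
       [("emotion", emotion),
        ("context",
          ((PySem.List.enumerate lines 0).foldl
            (fun (st : String × List Int × List Int) il =>
              let ctx := st.1; let us := st.2.1; let cs := st.2.2
              let i := il.1; let line := il.2
              if PySem.Str.startswith line "Context:" && (ctx == "") then
                (PySem.Str.strip (PySem.Str.replace line "Context:" ""), us, cs)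
              else if PySem.Str.startswith line "User:" then (ctx, us ++ [i], cs)
              else if PySem.Str.startswith line "Chatbot:" then (ctx, us, cs ++ [i])
              else (ctx, us, cs))
            ("", ([] : List Int), ([] : List Int))).1),
        ("user_input",
          match PySem.List.pyGet?
              (((PySem.List.enumerate lines 0).foldl
                (fun (st : String × List Int × List Int) il =>
                  let ctx := st.1; let us := st.2.1; let cs := st.2.2
                  let i := il.1; let line := il.2
                  if PySem.Str.startswith line "Context:" && (ctx == "") then
                    (PySem.Str.strip (PySem.Str.replace line "Context:" ""), us, cs)
                  else if PySem.Str.startswith line "User:" then (ctx, us ++ [i], cs)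
                  else if PySem.Str.startswith line "Chatbot:" then (ctx, us, cs ++ [i])
                  else (ctx, us, cs))
                ("", ([] : List Int), ([] : List Int))).2.1.filter
                (fun idx => decide (idx < last_chatbot_idx))) (-1) with
          | some last_user_idx =>
            PySem.Str.strip (PySem.Str.replace (PySem.List.pyGetD lines last_user_idx "") "User:" "")
          | none => ""),
        ("target_response",
          if last_chatbot_idx + 1 < (lines.length : Int) then
            PySem.Str.strip (PySem.Str.join "\n"
              ([PySem.Str.strip (PySem.Str.replace (PySem.List.pyGetD lines last_chatbot_idx "") "Chatbot:" "")]
                ++ PySem.List.slice lines (some (last_chatbot_idx + 1)) none))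
          else PySem.Str.strip (PySem.Str.replace (PySem.List.pyGetD lines last_chatbot_idx "") "Chatbot:" ""))]
     | none =>
       [("emotion", emotion),
        ("context",
          ((PySem.List.enumerate lines 0).foldl
            (fun (st : String × List Int × List Int) il =>
              let ctx := st.1; let us := st.2.1; let cs := st.2.2
              let i := il.1; let line := il.2
              if PySem.Str.startswith line "Context:" && (ctx == "") then
                (PySem.Str.strip (PySem.Str.replace line "Context:" ""), us, cs)
              else if PySem.Str.startswith line "User:" then (ctx, us ++ [i], cs)
              else if PySem.Str.startswith line "Chatbot:" then (ctx, us, cs ++ [i])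
              else (ctx, us, cs))
            ("", ([] : List Int), ([] : List Int))).1),
        ("user_input",
          match PySem.List.pyGet?
              (((PySem.List.enumerate lines 0).foldl
                (fun (st : String × List Int × List Int) il =>
                  let ctx := st.1; let us := st.2.1; let cs := st.2.2
                  let i := il.1; let line := il.2
                  if PySem.Str.startswith line "Context:" && (ctx == "") then
                    (PySem.Str.strip (PySem.Str.replace line "Context:" ""), us, cs)
                  else if PySem.Str.startswith line "User:" then (ctx, us ++ [i], cs)
                  else if PySem.Str.startswith line "Chatbot:" then (ctx, us, cs ++ [i])
                  else (ctx, us, cs))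
                ("", ([] : List Int), ([] : List Int))).2.1) (-1) with
          | some last_user_idx =>
            PySem.Str.strip (PySem.Str.replace (PySem.List.pyGetD lines last_user_idx "") "User:" "")
          | none => ""),
        ("target_response", "")])
    =
    (match pvSplitCb lines.reverse [] with
     | (some found, tail_rev, before) =>
       [("emotion", emotion), ("context", pvFirstContext lines),
        ("user_input", pvLastUser before),
        ("target_response",
          if tail_rev = [] then PySem.Str.strip (PySem.Str.replace found "Chatbot:" "")
          else PySem.Str.strip (PySem.Str.join "\n"
            (PySem.Str.strip (PySem.Str.replace found "Chatbot:" "") :: tail_rev.reverse)))]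
     | (none, _, _) =>
       [("emotion", emotion), ("context", pvFirstContext lines),
        ("user_input", pvLastUser lines.reverse), ("target_response", "")]) := by
  rw [pv_foldA lines 0 "" [] []]
  rcases pv_split lines with hclean | ⟨pre, c, post, hdec, hc, hpost⟩
  · rw [pvIdx_eq_nil pvPcb lines 0 hclean,
      pvSplitCb_none lines.reverse [] (fun l hl => hclean l (List.mem_reverse.mp hl))]
    simp only [List.nil_append]
    rw [show PySem.List.pyGet? ([] : List Int) (-1) = none from rfl]
    rw [PySem.List.pyGet?_neg_one, pvCtxF_eq_first, pv_lastUser lines]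
  · subst hdec
    have hrev : (pre ++ c :: post).reverse = post.reverse ++ c :: pre.reverse := by simp
    rw [hrev, pvSplitCb_found post.reverse c pre.reverse []
      (fun l hl => hpost l (List.mem_reverse.mp hl)) hc]
    rw [pvIdx_append pvPcb pre (c :: post) 0,
      pvIdx_cons_true pvPcb c post _ hc, pvIdx_eq_nil pvPcb post _ hpost]
    simp only [zero_add, List.nil_append]
    rw [PySem.List.pyGet?_neg_one, List.getLast?_concat]
    simp only []
    rw [pvCtxF_eq_first]
    rw [pvIdx_append pvPu pre (c :: post) 0]
    simp only [zero_add]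
    have h1 : (pvIdx pvPu pre 0).filter (fun idx => decide (idx < ((pre.length : Int)))) = pvIdx pvPu pre 0 := by
      apply List.filter_eq_self.mpr
      intro j hj
      have := pvIdx_bounds pvPu pre 0 j hj
      simp only [decide_eq_true_eq]
      omega
    have h2 : (pvIdx pvPu (c :: post) (pre.length : Int)).filter
        (fun idx => decide (idx < ((pre.length : Int)))) = [] := by
      apply List.filter_eq_nil_iff.mpr
      intro j hj
      have := pvIdx_bounds pvPu (c :: post) (pre.length : Int) j hj
      simp only [decide_eq_true_eq]
      omega
    rw [List.filter_append, h1, h2, List.append_nil, PySem.List.pyGet?_neg_one]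
    have hcget : PySem.List.pyGetD (pre ++ c :: post) ((pre.length : Int)) "" = c := by
      rw [PySem.List.pyGetD_eq_getElem _ _ (by positivity) (by simp)]
      simp
    have htrg : (if ((pre.length : Int)) + 1 < ((pre ++ c :: post).length : Int) then
          PySem.Str.strip (PySem.Str.join "\n"
            ([PySem.Str.strip (PySem.Str.replace (PySem.List.pyGetD (pre ++ c :: post) ((pre.length : Int)) "") "Chatbot:" "")]
              ++ PySem.List.slice (pre ++ c :: post) (some (((pre.length : Int)) + 1)) none))
        else PySem.Str.strip (PySem.Str.replace (PySem.List.pyGetD (pre ++ c :: post) ((pre.length : Int)) "") "Chatbot:" ""))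
        = (if post.reverse = [] then PySem.Str.strip (PySem.Str.replace c "Chatbot:" "")
          else PySem.Str.strip (PySem.Str.join "\n"
            (PySem.Str.strip (PySem.Str.replace c "Chatbot:" "") :: post.reverse.reverse))) := by
      rw [hcget]
      by_cases hp0 : post = []
      · subst hp0
        rw [if_neg (by simp), if_pos (by simp)]
      · have hslice : PySem.List.slice (pre ++ c :: post) (some (((pre.length : Int)) + 1)) none = post := by
          rw [PySem.List.slice_from (pre ++ c :: post) (show (0:Int) ≤ (pre.length : Int) + 1 from by omega)]
          rw [show (((pre.length : Int)) + 1).toNat = pre.length + 1 from by omega]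
          rw [show pre ++ c :: post = (pre ++ [c]) ++ post from by simp]
          rw [show pre.length + 1 = (pre ++ [c]).length from by simp, List.drop_left]
        rw [if_pos (by
            simp only [List.length_append, List.length_cons]
            have hplen : 0 < post.length := List.length_pos_of_ne_nil hp0
            push_cast; omega),
          if_neg (by simpa using hp0), hslice,
          List.reverse_reverse]
        rfl
    rw [htrg]
    rcases hlast : (pvIdx pvPu pre 0).getLast? with _ | j
    · have huser : pvLastUser pre.reverse = "" := by
        rw [← pv_lastUser pre, hlast]
      rw [huser]
    · have hj := pvIdx_bounds pvPu pre 0 j (List.mem_of_getLast? hlast)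
      have huser : pvLastUser pre.reverse
          = PySem.Str.strip (PySem.Str.replace (PySem.List.pyGetD pre j "") "User:" "") := by
        rw [← pv_lastUser pre, hlast]
      have hred : (match some j with
          | some last_user_idx => PySem.Str.strip (PySem.Str.replace
              (PySem.List.pyGetD (pre ++ c :: post) last_user_idx "") "User:" "")
          | (none : Option Int) => "")
          = PySem.Str.strip (PySem.Str.replace (PySem.List.pyGetD (pre ++ c :: post) j "") "User:" "") := rfl
      rw [huser, hred, pv_getD_append pre (c :: post) j (by omega) (by omega)]

-- ===== VERDICT (by name: the statement is the Claim_ definition above) =====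

theorem parse_training_format_spec : Claim_equal_parse_training_format := by
  intro text _
  unfold Spec_parse_training_format parse_training_format parse_training_format_alt
  generalize (PySem.Str.split? (PySem.Str.strip text) "\n").getD [] = L
  cases L with
  | nil => exact pv_main "neutral" []
  | cons l0 rest =>
    simp only []
    by_cases hb : (PySem.Str.startswith l0 "[" && PySem.Str.endswith l0 "]") = true
    · rw [if_pos hb]
      exact pv_main (PySem.Str.strip (PySem.Str.slice l0 (some 1) (some (-1)))) rest
    · rw [if_neg hb]
      exact pv_main "neutral" (l0 :: rest)
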